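-- pv_equiv track=rewrite | github.com/genichin/stage-pilot | .github/scripts/stagepilot-doctor.py | parse_release_feedback_inputs
-- ===== SOURCE A (Python) =====
-- def parse_release_feedback_inputs(text: str) -> dict[str, list[str]]:
--     lines = text.splitlines()
--     in_section = False
--     current_group: str | None = None
--     groups: dict[str, list[str]] = {
--         "observation": [],
--         "discovery": [],
--         "req": [],
--         "change-req": [],
--     }
--     group_labels = {
--         "Observation Summary": "observation",
--         "Discovery Input": "discovery",
--         "REQ Input": "req",
--         "Change Request Input": "change-req",
--     }
--
--     for line in lines:
--         stripped = line.strip()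
--         if stripped == "## Feedback Handoff":
--             in_section = True
--             current_group = None
--             continue
--         if in_section and stripped.startswith("## "):
--             break
--         if not in_section or not stripped.startswith("- "):
--             continue
--
--         value = stripped[2:].strip()
--         if value.endswith(":"):
--             current_group = group_labels.get(value[:-1].strip())
--             continue
--         if current_group is not None:
--             groups[current_group].append(value)
--
--     return groups
-- ===== SOURCE B (Python) =====
-- def parse_release_feedback_inputs(text: str) -> dict[str, list[str]]:
--     lines = text.splitlines()
--     keys = ("observation", "discovery", "req", "change-req")
--     group_labels = {
--         "Observation Summary": "observation",
--         "Discovery Input": "discovery",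
--         "REQ Input": "req",
--         "Change Request Input": "change-req",
--     }
--
--     # Phase 1: locate the section body (lines after the first handoff marker).
--     body = None
--     for i, line in enumerate(lines):
--         if line.strip() == "## Feedback Handoff":
--             body = lines[i + 1:]
--             break
--
--     # Phase 2: cut the section off at the next '## ' heading.
--     section = []
--     if body is not None:
--         for line in body:
--             if line.strip().startswith("## "):
--                 break
--             section.append(line)
--
--     # Phase 3: collect (group, value) pairs from the bullets of the section.
--     pairs = []
--     current = None
--     for line in section:
--         s = line.strip()
--         if not s.startswith("- "):
--             continue
--         value = s[2:].strip()
--         if value.endswith(":"):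
--             current = group_labels.get(value[:-1].strip())
--         elif current is not None:
--             pairs.append((current, value))
--
--     # Phase 4: group the pairs under the four fixed keys.
--     return {k: [v for g, v in pairs if g == k] for k in keys}
-- ===== Notes on version B (the rewrite author's own statement) =====
-- stated objective: simpler
-- what changed: A's single stateful loop with an in_section flag and in-place dict mutation is replaced by a four-phase pipeline: locate the handoff marker, cut the section slice at the next '## ' heading, collect flat (group, value) pairs, then build the result dict by a grouping comprehension; Pre_ excludes texts with more than one line stripping to '## Feedback Handoff', a duplicated-header corner where A's reset-and-continue and B's stop-at-heading are both defensible readings.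
import Mathlib
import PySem

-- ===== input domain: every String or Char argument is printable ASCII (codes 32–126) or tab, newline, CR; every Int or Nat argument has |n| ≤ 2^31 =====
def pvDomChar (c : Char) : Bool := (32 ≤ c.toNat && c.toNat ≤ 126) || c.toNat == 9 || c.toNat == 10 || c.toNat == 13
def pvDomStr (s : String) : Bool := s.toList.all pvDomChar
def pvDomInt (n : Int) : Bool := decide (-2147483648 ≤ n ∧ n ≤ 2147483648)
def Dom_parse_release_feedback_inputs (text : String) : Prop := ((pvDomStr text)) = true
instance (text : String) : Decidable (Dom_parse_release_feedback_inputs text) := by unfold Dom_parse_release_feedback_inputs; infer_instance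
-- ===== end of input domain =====

-- B replaces A's single stateful loop by a locate/slice/collect-pairs/group pipeline (objective: simpler decomposition).

-- ===== PORT A =====
def pvGroups0 : PySem.Dict String (List String) :=
  PySem.Dict.ofList [("observation", []), ("discovery", []), ("req", []), ("change-req", [])]

def pvLabelsA : PySem.Dict String String :=
  PySem.Dict.ofList [("Observation Summary", "observation"), ("Discovery Input", "discovery"),
                     ("REQ Input", "req"), ("Change Request Input", "change-req")]

def pvLoopA : List String → Bool → Option String → PySem.Dict String (List String) → PySem.Dict String (List String)
  | [], _, _, groups => groups
  | line :: rest, inSection, currentGroup, groups =>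
    let stripped := PySem.Str.strip line
    if stripped = "## Feedback Handoff" then pvLoopA rest true none groups
    else if inSection && PySem.Str.startswith stripped "## " then groups
    else if !inSection || !PySem.Str.startswith stripped "- " then pvLoopA rest inSection currentGroup groups
    else
      let value := PySem.Str.strip (PySem.Str.slice stripped (some 2) none)
      if PySem.Str.endswith value ":" then
        pvLoopA rest inSection (pvLabelsA.get? (PySem.Str.strip (PySem.Str.slice value none (some (-1))))) groups
      else
        match currentGroup with
        | some c => pvLoopA rest inSection currentGroup (groups.modify c [] (· ++ [value]))
        | none => pvLoopA rest inSection currentGroup groups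

def parse_release_feedback_inputs (text : String) : List (String × List String) :=
  (pvLoopA (PySem.Str.splitlines text) false none pvGroups0).items

-- ===== PORT B =====
def pvKeysB : List String := ["observation", "discovery", "req", "change-req"]

def pvLabelsB : PySem.Dict String String :=
  PySem.Dict.ofList [("Observation Summary", "observation"), ("Discovery Input", "discovery"),
                     ("REQ Input", "req"), ("Change Request Input", "change-req")]

-- Phase 1: lines after the first handoff marker (none = marker absent).
def pvFindBody : List String → Option (List String)
  | [] => none
  | line :: rest => if PySem.Str.strip line = "## Feedback Handoff" then some rest else pvFindBody rest

-- Phase 2: cut the section off at the next '## ' heading.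
def pvTakeSection : List String → List String
  | [] => []
  | line :: rest =>
    if PySem.Str.startswith (PySem.Str.strip line) "## " then []
    else line :: pvTakeSection rest

-- Phase 3: collect the (group, value) pairs of the section's bullets.
def pvCollectPairs : List String → Option String → List (String × String)
  | [], _ => []
  | line :: rest, current =>
    let s := PySem.Str.strip line
    if !PySem.Str.startswith s "- " then pvCollectPairs rest current
    else
      let value := PySem.Str.strip (PySem.Str.slice s (some 2) none)
      if PySem.Str.endswith value ":" then
        pvCollectPairs rest (pvLabelsB.get? (PySem.Str.strip (PySem.Str.slice value none (some (-1)))))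
      else
        match current with
        | some c => (c, value) :: pvCollectPairs rest (some c)
        | none => pvCollectPairs rest none

def parse_release_feedback_inputs_alt (text : String) : List (String × List String) :=
  let sec :=
    match pvFindBody (PySem.Str.splitlines text) with
    | none => []
    | some body => pvTakeSection body
  let pairs := pvCollectPairs sec none
  -- Phase 4: group the pairs under the four fixed keys.
  pvKeysB.map (fun k => (k, (pairs.filter (fun p => p.1 == k)).map (·.2)))

-- ===== PRECONDITION & SPEC =====
-- Pre_ excludes texts with more than one line stripping to '## Feedback Handoff' (A still returns there):
-- on such duplicated headers A resets the current group and continues the same section while B ends the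
-- section at the repeated heading — both defensible readings of an unspecified corner.
def Pre_parse_release_feedback_inputs (text : String) : Prop :=
  (PySem.Str.splitlines text).countP (fun l => PySem.Str.strip l == "## Feedback Handoff") ≤ 1
instance (text : String) : Decidable (Pre_parse_release_feedback_inputs text) := by
  unfold Pre_parse_release_feedback_inputs; infer_instance

def pvWitness_parse_release_feedback_inputs : String :=
  "## Feedback Handoff\n- Observation Summary:\n- alpha\n- REQ Input:\n- beta\n## Next"

def Spec_parse_release_feedback_inputs (text : String) (out : List (String × List String)) : Prop :=
  out = parse_release_feedback_inputs_alt text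
instance (text : String) (out : List (String × List String)) : Decidable (Spec_parse_release_feedback_inputs text out) := by
  unfold Spec_parse_release_feedback_inputs; infer_instance

-- ===== CLAIM (what is proved, stated in full; the proofs are below) =====
def Claim_equal_parse_release_feedback_inputs : Prop :=
  ∀ (text : String), Dom_parse_release_feedback_inputs text →
    Pre_parse_release_feedback_inputs text →
    Spec_parse_release_feedback_inputs text (parse_release_feedback_inputs text)

-- ===== LEMMAS AND PROOFS =====

-- A's loop inside the section equals a fold of B's collected pairs over the cut section.
theorem pvLoopA_sim (ls : List String) (cg : Option String) (g : PySem.Dict String (List String))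
    (h : ∀ l ∈ ls, PySem.Str.strip l ≠ "## Feedback Handoff") :
    pvLoopA ls true cg g
      = (pvCollectPairs (pvTakeSection ls) cg).foldl
          (fun g p => g.modify p.1 [] (· ++ [p.2])) g := by
  induction ls generalizing cg g with
  | nil => rfl
  | cons l ls ih =>
    have htail : ∀ x ∈ ls, PySem.Str.strip x ≠ "## Feedback Handoff" :=
      fun x hx => h x (by simp [hx])
    have hH := h l (by simp)
    simp only [pvLoopA, pvTakeSection, if_neg hH, Bool.true_and, Bool.not_true, Bool.false_or,
      show pvLabelsA = pvLabelsB from rfl]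
    cases h2 : PySem.Str.startswith (PySem.Str.strip l) "## " with
    | true =>
      simp only [if_true, pvCollectPairs, List.foldl_nil]
    | false =>
      simp only [Bool.false_eq_true, if_false, pvCollectPairs]
      cases hb : PySem.Str.startswith (PySem.Str.strip l) "- " with
      | false =>
        simp only [Bool.not_false, if_true]
        exact ih _ _ htail
      | true =>
        simp only [Bool.not_true, Bool.false_eq_true, if_false]
        cases hv : PySem.Str.endswith (PySem.Str.strip (PySem.Str.slice (PySem.Str.strip l) (some 2) none)) ":" with
        | true =>
          simp only [if_true]
          exact ih _ _ htail
        | false =>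
          simp only [Bool.false_eq_true, if_false]
          cases cg with
          | none => exact ih _ _ htail
          | some c =>
            simp only [List.foldl_cons]
            exact ih _ _ htail

-- every group name B looks up comes from the label table, hence is one of the four keys
theorem pvLabelsB_range (x c : String) (h : pvLabelsB.get? x = some c) : c ∈ pvKeysB := by
  have hmk : pvLabelsB = PySem.Dict.mk [("Observation Summary", "observation"), ("Discovery Input", "discovery"),
                     ("REQ Input", "req"), ("Change Request Input", "change-req")] := by decide
  rw [hmk] at h
  simp only [PySem.Dict.get?_mk_cons] at h
  split_ifs at h <;> simp_all [pvKeysB, PySem.Dict.get?]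

theorem pvCollectPairs_keys (ls : List String) (cur : Option String)
    (hc : ∀ c, cur = some c → c ∈ pvKeysB) :
    ∀ p ∈ pvCollectPairs ls cur, p.1 ∈ pvKeysB := by
  induction ls generalizing cur with
  | nil => simp [pvCollectPairs]
  | cons l ls ih =>
    intro p hp
    simp only [pvCollectPairs] at hp
    cases hb : PySem.Str.startswith (PySem.Str.strip l) "- " with
    | false =>
      rw [hb] at hp
      simp only [Bool.not_false, if_true] at hp
      exact ih cur hc p hp
    | true =>
      rw [hb] at hp
      simp only [Bool.not_true, Bool.false_eq_true, if_false] at hp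
      cases hv : PySem.Str.endswith (PySem.Str.strip (PySem.Str.slice (PySem.Str.strip l) (some 2) none)) ":" with
      | true =>
        rw [hv] at hp
        simp only [if_true] at hp
        exact ih _ (fun c hcc => pvLabelsB_range _ c hcc) p hp
      | false =>
        rw [hv] at hp
        simp only [Bool.false_eq_true, if_false] at hp
        cases cur with
        | none => exact ih none (by simp) p hp
        | some c =>
          simp only at hp
          rcases List.mem_cons.mp hp with h1 | h1
          · subst h1; exact hc c rfl
          · exact ih (some c) hc p h1

-- the modify-fold over the pre-initialised dict is the per-key filter of the pairs
theorem pvFold_items (ps : List (String × String))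
    (h : ∀ p ∈ ps, p.1 ∈ pvKeysB) :
    (ps.foldl (fun g p => g.modify p.1 [] (· ++ [p.2])) pvGroups0).items
      = pvKeysB.map (fun k => (k, (ps.filter (fun p => p.1 == k)).map (·.2))) := by
  have hkeys0 : pvGroups0.keys = pvKeysB := by decide
  have hk : (ps.foldl (fun g p => g.modify p.1 [] (· ++ [p.2])) pvGroups0).keys = pvKeysB := by
    rw [PySem.Dict.keys_foldl_modify_key]
    rw [PySem.Set.update_eq_append_filter, hkeys0]
    have hfil : (PySem.Set.ofList (ps.map (·.1))).filter (fun y => !(PySem.Set.contains pvKeysB y)) = [] := by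
      rw [List.filter_eq_nil_iff]
      intro a ha
      have hmem : a ∈ ps.map (·.1) := (PySem.Set.mem_ofList _ _).mp ha
      rcases List.mem_map.mp hmem with ⟨p, hp, rfl⟩
      simpa using h p hp
    rw [hfil, List.append_nil]
  have hnd : (ps.foldl (fun g p => g.modify p.1 [] (· ++ [p.2])) pvGroups0).keys.Nodup := by
    rw [hk]; decide
  rw [PySem.Dict.items_eq_map_keys _ hnd ([] : List String), hk]
  apply List.map_congr_left
  intro k hkmem
  rw [PySem.Dict.getD_foldl_modify_append]
  have h0 : pvGroups0.getD k [] = [] := by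
    simp only [pvKeysB, List.mem_cons, List.not_mem_nil, or_false] at hkmem
    rcases hkmem with rfl | rfl | rfl | rfl <;> decide
  rw [h0, List.nil_append]

-- A's whole loop against B's pipeline, over the raw line list
theorem pvMain (ls : List String)
    (h : ls.countP (fun l => PySem.Str.strip l == "## Feedback Handoff") ≤ 1) :
    (pvLoopA ls false none pvGroups0).items
      = pvKeysB.map (fun k =>
          (k, ((pvCollectPairs
                 (match pvFindBody ls with
                  | none => []
                  | some body => pvTakeSection body) none).filter (fun p => p.1 == k)).map (·.2))) := by
  induction ls with
  | nil => decide
  | cons l ls ih =>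
    by_cases hH : PySem.Str.strip l = "## Feedback Handoff"
    · have hz : ls.countP (fun l => PySem.Str.strip l == "## Feedback Handoff") = 0 := by
        have hl : (PySem.Str.strip l == "## Feedback Handoff") = true := by simp [hH]
        rw [List.countP_cons, if_pos hl] at h
        omega
      have hno : ∀ x ∈ ls, PySem.Str.strip x ≠ "## Feedback Handoff" := by
        intro x hx
        have := List.countP_eq_zero.mp hz x hx
        simpa using this
      simp only [pvLoopA, pvFindBody, if_pos hH]
      rw [pvLoopA_sim ls none pvGroups0 hno]
      exact pvFold_items _ (pvCollectPairs_keys _ none (by simp))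
    · have hl : (PySem.Str.strip l == "## Feedback Handoff") = false := by
        simpa using hH
      have ht : ls.countP (fun l => PySem.Str.strip l == "## Feedback Handoff") ≤ 1 := by
        rw [List.countP_cons, hl] at h
        simp only [Bool.false_eq_true, if_false] at h
        omega
      simp only [pvLoopA, pvFindBody, if_neg hH]
      simp only [Bool.false_and, Bool.not_false, Bool.true_or, Bool.false_eq_true, if_false, if_true]
      exact ih ht

-- ===== VERDICT (by name: the statement is the Claim_ definition above) =====
theorem parse_release_feedback_inputs_spec : Claim_equal_parse_release_feedback_inputs := by
  intro text _ hpre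
  unfold Spec_parse_release_feedback_inputs parse_release_feedback_inputs parse_release_feedback_inputs_alt
  exact pvMain (PySem.Str.splitlines text) hpre
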